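-- pv_equiv track=rewrite | github.com/alankrit03/HackerRank_Algorithms | Happy Ladybugs.py | happyLadybugs
-- ===== SOURCE A (Python) =====
-- def happyLadybugs(b):
--     #
--     # Write your code here.
--     #
--     data = sorted(list(b))
--     n = len(data)
--     if n==1:
--         if data[0] == "_":
--             return 'YES'
--         else:return 'NO'
--     i = 0
--     while i < n:
--         if i == 0:
--             if data[i] != data[i+1]:
--                 return 'NO'
--         elif i == n-1:
--             if data[i] != data[i-1] and data[i]!='_':
--                 return 'NO'
--         else:
--             if data[i] != data[i-1] and data[i]!=data[i+1]:
--                 return 'NO'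
--         i += 1
--
--     # if ''.join(data) == b or data[-1]=='_':
--     #     return 'YES'
--     return 'YES'
-- ===== SOURCE B (Python) =====
-- def happyLadybugs(b):
--     counts = {}
--     for c in b:
--         counts[c] = counts.get(c, 0) + 1
--     for c, k in counts.items():
--         if k == 1 and c != '_':
--             return 'NO'
--     return 'YES'
-- ===== Notes on version B (the rewrite author's own statement) =====
-- stated objective: faster
-- what changed: B replaces A's sort-then-neighbour-scan with a single frequency-counting pass: NO exactly when some ladybug colour occurs only once, with a blank cell never unhappy.
-- intended difference: On strings that contain the blank character exactly once together with some character that sorts above the blank (such as a lowercase letter) and in which every non-blank character occurs at least twice, A answers NO because its sorted order no longer places the blank last, while B answers YES - a blank cell is not a ladybug and needs no same-colour neighbour, so B gives the intended answer. — e.g. on happyLadybugs("aa_"): A returns "NO", B returns "YES"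
import Mathlib
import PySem

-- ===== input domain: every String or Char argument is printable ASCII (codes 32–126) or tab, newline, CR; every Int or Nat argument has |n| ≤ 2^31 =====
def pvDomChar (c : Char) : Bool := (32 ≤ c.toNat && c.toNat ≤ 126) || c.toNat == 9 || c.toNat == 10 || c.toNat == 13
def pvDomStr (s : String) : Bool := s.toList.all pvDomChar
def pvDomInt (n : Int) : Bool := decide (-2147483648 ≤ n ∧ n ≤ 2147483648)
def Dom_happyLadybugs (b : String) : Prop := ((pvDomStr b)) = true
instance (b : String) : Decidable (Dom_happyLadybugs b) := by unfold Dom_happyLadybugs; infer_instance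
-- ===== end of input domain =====

-- B counts character frequencies in one pass instead of sorting and scanning neighbours;
-- it treats a lone blank '_' as happy regardless of the other characters (see D_ below).

-- ===== PORT A =====
-- the while loop of A: index i runs until n; every data[i±1] access is in range whenever
-- the loop is entered (n = 0 skips it, n = 1 is handled before it), so comparing the
-- pyGet? options is exact.
def happyLadybugsLoop (data : List Char) (n : Nat) (i : Nat) : String :=
  if i < n then
    if i == 0 then
      if PySem.List.pyGet? data (i : Int) ≠ PySem.List.pyGet? data ((i : Int) + 1) then "NO"
      else happyLadybugsLoop data n (i + 1)
    else if i == n - 1 then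
      if PySem.List.pyGet? data (i : Int) ≠ PySem.List.pyGet? data ((i : Int) - 1) ∧
         PySem.List.pyGet? data (i : Int) ≠ some '_' then "NO"
      else happyLadybugsLoop data n (i + 1)
    else
      if PySem.List.pyGet? data (i : Int) ≠ PySem.List.pyGet? data ((i : Int) - 1) ∧
         PySem.List.pyGet? data (i : Int) ≠ PySem.List.pyGet? data ((i : Int) + 1) then "NO"
      else happyLadybugsLoop data n (i + 1)
  else "YES"
termination_by n - i

def happyLadybugs (b : String) : String :=
  let data := PySem.List.sorted b.toList (fun x => x) false
  let n := data.length
  if n == 1 then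
    if PySem.List.pyGet? data 0 = some '_' then "YES" else "NO"
  else happyLadybugsLoop data n 0

-- ===== PORT B =====
-- the 'for c, k in counts.items()' loop with its early return
def happyLadybugsAltLoop : List (Char × Int) → String
  | [] => "YES"
  | (c, k) :: rest =>
    if k == 1 && !(c == '_') then "NO"
    else happyLadybugsAltLoop rest

def happyLadybugs_alt (b : String) : String :=
  let counts := b.toList.foldl (fun d c => d.insert c (d.getD c 0 + 1)) PySem.Dict.empty
  happyLadybugsAltLoop counts.items

-- ===== PRECONDITION & SPEC =====
-- On strings that contain the blank character exactly once together with some character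
-- that sorts above the blank (such as a lowercase letter) and in which every non-blank
-- character occurs at least twice, A answers NO because its sorted order no longer places
-- the blank last, while B answers YES — a blank cell is not a ladybug and needs no
-- same-colour neighbour, so B gives the intended answer.
def D_happyLadybugs (b : String) : Prop :=
  b.toList.count '_' = 1 ∧
    b.toList.any (fun c => decide ('_' < c)) = true ∧
    b.toList.all (fun c => c == '_' || decide (2 ≤ b.toList.count c)) = true
instance (b : String) : Decidable (D_happyLadybugs b) := by unfold D_happyLadybugs; infer_instance

def Spec_happyLadybugs (b : String) (out : String) : Prop := ¬ D_happyLadybugs b → out = happyLadybugs_alt b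
instance (b : String) (out : String) : Decidable (Spec_happyLadybugs b out) := by unfold Spec_happyLadybugs; infer_instance

def pvDiffWitness_happyLadybugs : String := "aa_"
def pvDiffWitnessOut_happyLadybugs : String × String := ("NO", "YES")

-- ===== CLAIM (what is proved, stated in full; the proofs are below) =====
def Claim_unchanged_happyLadybugs : Prop := ∀ (b : String), Dom_happyLadybugs b → Spec_happyLadybugs b (happyLadybugs b)
def Claim_changed_happyLadybugs : Prop := Dom_happyLadybugs (pvDiffWitness_happyLadybugs) ∧ D_happyLadybugs (pvDiffWitness_happyLadybugs) ∧ happyLadybugs (pvDiffWitness_happyLadybugs) = pvDiffWitnessOut_happyLadybugs.1 ∧ happyLadybugs_alt (pvDiffWitness_happyLadybugs) = pvDiffWitnessOut_happyLadybugs.2 ∧ pvDiffWitnessOut_happyLadybugs.1 ≠ pvDiffWitnessOut_happyLadybugs.2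
def Claim_exact_happyLadybugs : Prop := ∀ (b : String), Dom_happyLadybugs b → D_happyLadybugs b → happyLadybugs b ≠ happyLadybugs_alt b

-- ===== LEMMAS AND PROOFS =====

theorem D_iff (b : String) : D_happyLadybugs b ↔
    (b.toList.count '_' = 1 ∧ (∃ c ∈ b.toList, '_' < c) ∧
      ∀ c ∈ b.toList, c ≠ '_' → 2 ≤ b.toList.count c) := by
  unfold D_happyLadybugs
  simp only [List.any_eq_true, List.all_eq_true, Bool.or_eq_true, beq_iff_eq,
    decide_eq_true_eq]
  constructor
  · rintro ⟨h1, h2, h3⟩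
    exact ⟨h1, h2, fun c hc hne => ((h3 c hc).resolve_left hne)⟩
  · rintro ⟨h1, h2, h3⟩
    refine ⟨h1, h2, fun c hc => ?_⟩
    by_cases hne : c = '_'
    · exact Or.inl hne
    · exact Or.inr (h3 c hc hne)

-- mirror of A's loop-body test at index i
def OkAt (s : List Char) (n : Nat) (i : Nat) : Prop :=
  if i = 0 then
    ¬(PySem.List.pyGet? s (i : Int) ≠ PySem.List.pyGet? s ((i : Int) + 1))
  else if i = n - 1 then
    ¬(PySem.List.pyGet? s (i : Int) ≠ PySem.List.pyGet? s ((i : Int) - 1) ∧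
      PySem.List.pyGet? s (i : Int) ≠ some '_')
  else
    ¬(PySem.List.pyGet? s (i : Int) ≠ PySem.List.pyGet? s ((i : Int) - 1) ∧
      PySem.List.pyGet? s (i : Int) ≠ PySem.List.pyGet? s ((i : Int) + 1))

-- what A computes: every character occurring exactly once is '_' and maximal
def GoodL (l : List Char) : Prop :=
  ∀ c ∈ l, 2 ≤ l.count c ∨ (c = '_' ∧ ∀ d ∈ l, d ≤ c)

-- what B computes: every character occurring exactly once is '_'
def GoodB (l : List Char) : Prop :=
  ∀ c ∈ l, 2 ≤ l.count c ∨ c = '_'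

theorem loop_yes_iff (s : List Char) (n : Nat) :
    ∀ (fuel i : Nat), n - i = fuel →
      (happyLadybugsLoop s n i = "YES" ↔ ∀ j, i ≤ j → j < n → OkAt s n j) := by
  intro fuel
  induction fuel with
  | zero =>
    intro i hfi
    rw [happyLadybugsLoop]
    rw [if_neg (by omega)]
    constructor
    · intro _ j hij hjn; omega
    · intro _; rfl
  | succ k ih =>
    intro i hfi
    have hin : i < n := by omega
    have hnext := ih (i+1) (by omega)
    rw [happyLadybugsLoop, if_pos hin]
    have hstep : ∀ (P : Prop) [Decidable P],
        ((if P then "NO" else happyLadybugsLoop s n (i+1)) = "YES" ↔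
          ¬P ∧ ∀ j, i + 1 ≤ j → j < n → OkAt s n j) := by
      intro P _
      split_ifs with hP
      · simp [hP]
      · simp [hP, hnext]
    have hall : ∀ (P : Prop), (P ∧ ∀ j, i + 1 ≤ j → j < n → OkAt s n j) →
        (OkAt s n i ↔ P) → (∀ j, i ≤ j → j < n → OkAt s n j) := by
      intro P ⟨hP, hrest⟩ hiff j hij hjn
      rcases Nat.eq_or_lt_of_le hij with rfl | h
      · exact hiff.mpr hP
      · exact hrest j (by omega) hjn
    by_cases h0 : i = 0
    · rw [if_pos (by simpa using h0)]
      rw [hstep]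
      constructor
      · rintro ⟨hP, hrest⟩
        exact hall _ ⟨hP, hrest⟩ (by rw [OkAt, if_pos h0])
      · intro hok
        refine ⟨?_, fun j hij hjn => hok j (by omega) hjn⟩
        have := hok i (le_refl _) hin
        rw [OkAt, if_pos h0] at this; exact this
    · rw [if_neg (by simpa using h0)]
      by_cases h1 : i = n - 1
      · rw [if_pos (by simpa using h1)]
        rw [hstep]
        constructor
        · rintro ⟨hP, hrest⟩
          exact hall _ ⟨hP, hrest⟩ (by rw [OkAt, if_neg h0, if_pos h1])
        · intro hok
          refine ⟨?_, fun j hij hjn => hok j (by omega) hjn⟩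
          have := hok i (le_refl _) hin
          rw [OkAt, if_neg h0, if_pos h1] at this; exact this
      · rw [if_neg (by simpa using h1)]
        rw [hstep]
        constructor
        · rintro ⟨hP, hrest⟩
          exact hall _ ⟨hP, hrest⟩ (by rw [OkAt, if_neg h0, if_neg h1])
        · intro hok
          refine ⟨?_, fun j hij hjn => hok j (by omega) hjn⟩
          have := hok i (le_refl _) hin
          rw [OkAt, if_neg h0, if_neg h1] at this; exact this

theorem loop_values (s : List Char) (n : Nat) :
    ∀ (fuel i : Nat), n - i = fuel →
      happyLadybugsLoop s n i = "YES" ∨ happyLadybugsLoop s n i = "NO" := by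
  intro fuel
  induction fuel with
  | zero =>
    intro i hfi
    rw [happyLadybugsLoop, if_neg (by omega)]; left; rfl
  | succ k ih =>
    intro i hfi
    rw [happyLadybugsLoop, if_pos (by omega)]
    have := ih (i+1) (by omega)
    split_ifs <;> simp_all

theorem pyGet?_nat (s : List Char) (j : Nat) (h : j < s.length) :
    PySem.List.pyGet? s (j : Int) = some s[j] := by
  simp [PySem.List.pyGet?_natCast, List.getElem?_eq_getElem h]

theorem okAt_zero (s : List Char) (n : Nat) (h2 : 2 ≤ s.length) :
    OkAt s n 0 ↔ s[0]'(by omega) = s[1]'(by omega) := by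
  rw [OkAt, if_pos rfl]
  rw [show ((0:Nat):Int) + 1 = ((1:Nat):Int) by norm_num]
  rw [pyGet?_nat s 0 (by omega), pyGet?_nat s 1 (by omega)]
  simp

theorem okAt_last (s : List Char) (j : Nat) (h0 : j ≠ 0) (hj : j = s.length - 1)
    (hlt : j < s.length) :
    OkAt s s.length j ↔ (s[j] = s[j-1]'(by omega) ∨ s[j] = '_') := by
  rw [OkAt, if_neg h0, if_pos hj]
  rw [show (j:Int) - 1 = ((j-1:Nat):Int) by omega]
  rw [pyGet?_nat s j hlt, pyGet?_nat s (j-1) (by omega)]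
  simp; tauto

theorem okAt_mid (s : List Char) (j : Nat) (h0 : j ≠ 0) (hj : j ≠ s.length - 1)
    (hlt : j < s.length) :
    OkAt s s.length j ↔ (s[j] = s[j-1]'(by omega) ∨ s[j] = s[j+1]'(by omega)) := by
  rw [OkAt, if_neg h0, if_neg hj]
  rw [show (j:Int) - 1 = ((j-1:Nat):Int) by omega,
      show (j:Int) + 1 = ((j+1:Nat):Int) by omega]
  rw [pyGet?_nat s j hlt, pyGet?_nat s (j-1) (by omega), pyGet?_nat s (j+1) (by omega)]
  simp; tauto

theorem pairwise_getElem_mono (s : List Char) (hs : s.Pairwise (· ≤ ·))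
    (p q : Nat) (hpq : p ≤ q) (hq : q < s.length) : s[p]'(Nat.lt_of_le_of_lt hpq hq) ≤ s[q] := by
  rcases Nat.lt_or_ge p q with h | h
  · exact (List.pairwise_iff_getElem.mp hs) p q _ hq h
  · have : p = q := Nat.le_antisymm hpq h
    subst this; exact le_refl _

theorem neighbor_of_count (s : List Char) (hs : s.Pairwise (· ≤ ·)) (j : Nat)
    (hj : j < s.length) (hcnt : 2 ≤ s.count s[j]) :
    (∃ h : j + 1 < s.length, s[j+1] = s[j]) ∨ (1 ≤ j ∧ ∃ h : j - 1 < s.length, s[j-1] = s[j]) := by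
  obtain ⟨c, hc⟩ : ∃ c, s[j] = c := ⟨_, rfl⟩
  rw [hc] at hcnt ⊢
  have hsplit : s = s.take j ++ s.drop j := (List.take_append_drop j s).symm
  have hdrop : s.drop j = c :: s.drop (j+1) := by rw [← List.getElem_cons_drop hj, hc]
  have hdecomp : s.count c = (s.take j).count c + (1 + (s.drop (j+1)).count c) := by
    conv_lhs => rw [hsplit, List.count_append, hdrop, List.count_cons_self]
    omega
  have h2 : 1 ≤ (s.take j).count c ∨ 1 ≤ (s.drop (j+1)).count c := by omega
  rcases h2 with h1 | h1
  · -- an equal element strictly before j ⇒ s[j-1] = c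
    right
    obtain ⟨k, hk, hkc⟩ := List.mem_iff_getElem.mp (List.count_pos_iff.mp (by omega : 0 < (s.take j).count c))
    have hkj : k < j := by have := hk; rw [List.length_take] at this; omega
    have hks : s[k]'(by omega) = c := by rw [← hkc, List.getElem_take]
    have hj1 : j - 1 < s.length := by omega
    refine ⟨by omega, hj1, ?_⟩
    have hle1 : s[k]'(by omega) ≤ s[j-1]'hj1 := pairwise_getElem_mono s hs k (j-1) (by omega) hj1
    have hle2 : s[j-1]'hj1 ≤ s[j] := pairwise_getElem_mono s hs (j-1) j (by omega) hj
    rw [hks] at hle1; rw [hc] at hle2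
    exact le_antisymm hle2 hle1
  · -- an equal element strictly after j ⇒ s[j+1] = c
    left
    obtain ⟨k, hk, hkc⟩ := List.mem_iff_getElem.mp (List.count_pos_iff.mp (by omega : 0 < (s.drop (j+1)).count c))
    have hklen : j + 1 + k < s.length := by have := hk; rw [List.length_drop] at this; omega
    have hks : s[j+1+k]'hklen = c := by rw [← hkc, List.getElem_drop]
    have hj1 : j + 1 < s.length := by omega
    refine ⟨hj1, ?_⟩
    have hle1 : s[j] ≤ s[j+1]'hj1 := pairwise_getElem_mono s hs j (j+1) (by omega) hj1
    have hle2 : s[j+1]'hj1 ≤ s[j+1+k]'hklen := pairwise_getElem_mono s hs (j+1) (j+1+k) (by omega) hklen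
    rw [hks] at hle2; rw [hc] at hle1
    exact le_antisymm hle2 hle1

theorem two_idx_count (s : List Char) (j k : Nat) (hjk : j < k) (hk : k < s.length)
    (hc : s[j]'(Nat.lt_trans hjk hk) = s[k]) : 2 ≤ s.count s[k] := by
  have hsplit : s = s.take k ++ s.drop k := (List.take_append_drop k s).symm
  have hdrop : s.drop k = s[k] :: s.drop (k+1) := by
    rw [List.getElem_cons_drop]
  have hmem : s[k] ∈ s.take k := by
    have hjt : j < (s.take k).length := by simp [List.length_take]; omega
    have : (s.take k)[j] = s[k] := by rw [List.getElem_take]; exact hc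
    exact this ▸ List.getElem_mem hjt
  have h1 : 1 ≤ (s.take k).count s[k] := List.count_pos_iff.mpr hmem
  obtain ⟨c, hc2⟩ : ∃ c, s[k] = c := ⟨_, rfl⟩
  rw [hc2] at hdrop hmem h1 ⊢
  calc 2 ≤ (s.take k).count c + 1 := by omega
    _ ≤ (s.take k).count c + (s.drop k).count c := by
        rw [hdrop, List.count_cons_self]; omega
    _ = s.count c := by conv_rhs => rw [hsplit, List.count_append]

theorem count_ge_two_of_eq (s : List Char) (j k : Nat) (hj : j < s.length) (hk : k < s.length)
    (hne : j ≠ k) (hc : s[j] = s[k]) : 2 ≤ s.count s[j] := by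
  rcases Nat.lt_or_ge j k with h | h
  · rw [hc]; exact two_idx_count s j k h hk hc
  · have hkj : k < j := by omega
    exact two_idx_count s k j hkj hj hc.symm

theorem scan_iff_good (s : List Char) (hs : s.Pairwise (· ≤ ·)) (h2 : 2 ≤ s.length) :
    (∀ j, 0 ≤ j → j < s.length → OkAt s s.length j) ↔ GoodL s := by
  constructor
  · intro hok c hc
    obtain ⟨j, hj, rfl⟩ := List.mem_iff_getElem.mp hc
    by_cases hcnt : 2 ≤ s.count s[j]
    · exact Or.inl hcnt
    · right
      by_cases h0 : j = 0
      · exfalso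
        subst h0
        have := (okAt_zero s s.length h2).mp (hok 0 (by omega) hj)
        exact hcnt (count_ge_two_of_eq s 0 1 (by omega) (by omega) (by omega) this)
      · by_cases h1 : j = s.length - 1
        · have := (okAt_last s j h0 h1 hj).mp (hok j (by omega) hj)
          rcases this with heq | hund
          · exact absurd (count_ge_two_of_eq s j (j-1) hj (by omega) (by omega) heq) hcnt
          · refine ⟨hund, fun d hd => ?_⟩
            obtain ⟨k, hk, rfl⟩ := List.mem_iff_getElem.mp hd
            have : s[k] ≤ s[s.length - 1]'(by omega) :=
              pairwise_getElem_mono s hs k (s.length - 1) (by omega) (by omega)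
            convert this using 2
        · exfalso
          have := (okAt_mid s j h0 h1 hj).mp (hok j (by omega) hj)
          rcases this with heq | heq
          · exact hcnt (count_ge_two_of_eq s j (j-1) hj (by omega) (by omega) heq)
          · exact hcnt (count_ge_two_of_eq s j (j+1) hj (by omega) (by omega) heq)
  · intro hg j _ hj
    have hmem : s[j] ∈ s := List.getElem_mem hj
    by_cases hcnt : 2 ≤ s.count s[j]
    · have := neighbor_of_count s hs j hj hcnt
      by_cases h0 : j = 0
      · subst h0
        rw [okAt_zero s s.length h2]
        rcases this with ⟨h, heq⟩ | ⟨h1, _⟩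
        · exact heq.symm
        · omega
      · by_cases h1 : j = s.length - 1
        · rw [okAt_last s j h0 h1 hj]
          rcases this with ⟨h, heq⟩ | ⟨hge, h, heq⟩
          · omega
          · exact Or.inl heq.symm
        · rw [okAt_mid s j h0 h1 hj]
          rcases this with ⟨h, heq⟩ | ⟨hge, h, heq⟩
          · exact Or.inr heq.symm
          · exact Or.inl heq.symm
    · rcases hg s[j] hmem with h | ⟨hund, hmax⟩
      · exact absurd h hcnt
      · -- count 1, '_' and maximal: j must be the last index
        have hjlast : j = s.length - 1 := by
          by_contra h1
          have hj1 : j + 1 < s.length := by omega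
          have hle : s[j] ≤ s[j+1] := pairwise_getElem_mono s hs j (j+1) (by omega) hj1
          have hge : s[j+1] ≤ s[j] := hmax s[j+1] (List.getElem_mem hj1)
          have heq : s[j+1] = s[j] := le_antisymm hge hle
          exact hcnt (count_ge_two_of_eq s j (j+1) hj hj1 (by omega) heq.symm)
        have h0 : j ≠ 0 := by omega
        rw [okAt_last s j h0 hjlast hj]
        exact Or.inr hund

theorem goodL_perm {l l' : List Char} (h : l.Perm l') : GoodL l ↔ GoodL l' := by
  unfold GoodL
  constructor <;> intro hg c hc
  · rcases hg c (h.mem_iff.mpr hc) with h2 | ⟨hund, hmax⟩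
    · exact Or.inl (h.count_eq c ▸ h2)
    · exact Or.inr ⟨hund, fun d hd => hmax d (h.mem_iff.mpr hd)⟩
  · rcases hg c (h.mem_iff.mp hc) with h2 | ⟨hund, hmax⟩
    · exact Or.inl (h.count_eq c ▸ h2)
    · exact Or.inr ⟨hund, fun d hd => hmax d (h.mem_iff.mp hd)⟩

theorem A_yes_iff (b : String) :
    happyLadybugs b = "YES" ↔ GoodL b.toList := by
  rw [happyLadybugs]
  have hperm := PySem.List.sorted_perm b.toList (fun x => x) false
  have hpair : (PySem.List.sorted b.toList (fun x => x) false).Pairwise (· ≤ ·) :=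
    PySem.List.sorted_pairwise b.toList (fun x => x)
  set s := PySem.List.sorted b.toList (fun x => x) false with hsdef
  clear_value s
  rw [← goodL_perm hperm]
  by_cases h1 : s.length = 1
  · rw [if_pos (by simpa using h1)]
    obtain ⟨c, rfl⟩ := List.length_eq_one_iff.mp h1
    rw [show PySem.List.pyGet? [c] 0 = some c from rfl]
    constructor
    · intro h
      by_cases hc : c = '_'
      · intro d hd
        rcases List.mem_singleton.mp hd with rfl
        exact Or.inr ⟨hc, fun e he => by rcases List.mem_singleton.mp he with rfl; exact le_refl _⟩
      · rw [if_neg (by simpa using hc)] at h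
        exact absurd h (by decide)
    · intro hg
      rcases hg c (List.mem_singleton_self c) with h2 | ⟨hund, _⟩
      · simp at h2
      · rw [if_pos (by simpa using hund)]
  · rw [if_neg (by simpa using h1)]
    by_cases h0 : s.length = 0
    · have hnil : s = [] := List.length_eq_zero_iff.mp h0
      rw [loop_yes_iff s s.length (s.length - 0) 0 rfl]
      constructor
      · intro _ c hc
        rw [hnil] at hc; exact absurd hc (List.not_mem_nil)
      · intro _ j _ hj; omega
    · have h2 : 2 ≤ s.length := by omega
      rw [loop_yes_iff s s.length s.length 0 (by omega)]
      rw [show (∀ j, 0 ≤ j → j < s.length → OkAt s s.length j) ↔ GoodL s from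
        scan_iff_good s hpair h2]

theorem altLoop_yes_iff (xs : List (Char × Int)) :
    happyLadybugsAltLoop xs = "YES" ↔
      ∀ p ∈ xs, ¬(p.2 = 1 ∧ p.1 ≠ '_') := by
  induction xs with
  | nil => simp [happyLadybugsAltLoop]
  | cons p rest ih =>
    obtain ⟨c, k⟩ := p
    rw [happyLadybugsAltLoop]
    split_ifs with h
    · simp only [Bool.and_eq_true, beq_iff_eq, Bool.not_eq_true', beq_eq_false_iff_ne, ne_eq] at h
      constructor
      · intro habs; exact absurd habs (by decide)
      · intro hall
        have := hall (c, k) List.mem_cons_self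
        simp only at this
        exact absurd (by tauto) this
    · simp only [Bool.and_eq_true, beq_iff_eq, Bool.not_eq_true', beq_eq_false_iff_ne, ne_eq] at h
      rw [ih]
      constructor
      · intro hrest q hq
        rcases List.mem_cons.mp hq with rfl | hq'
        · simp only; tauto
        · exact hrest q hq'
      · intro hall q hq; exact hall q (List.mem_cons_of_mem _ hq)

theorem altLoop_values (xs : List (Char × Int)) :
    happyLadybugsAltLoop xs = "YES" ∨ happyLadybugsAltLoop xs = "NO" := by
  induction xs with
  | nil => left; rfl
  | cons p rest ih =>
    obtain ⟨c, k⟩ := p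
    rw [happyLadybugsAltLoop]
    split_ifs <;> simp_all

theorem B_yes_iff (b : String) :
    happyLadybugs_alt b = "YES" ↔ GoodB b.toList := by
  rw [happyLadybugs_alt]
  rw [PySem.Dict.foldl_insert_getD_add_one_eq_counter, PySem.Dict.items_counter]
  rw [altLoop_yes_iff]
  simp only [List.mem_map]
  constructor
  · intro hall c hc
    have := hall (c, (b.toList.count c : Int)) ⟨c, (PySem.Set.mem_ofList _ _).mpr hc, rfl⟩
    simp only [ne_eq] at this
    have h1 : 1 ≤ b.toList.count c := List.count_pos_iff.mpr hc
    by_cases h2 : 2 ≤ b.toList.count c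
    · exact Or.inl h2
    · right
      have hc1 : (b.toList.count c : Int) = 1 := by omega
      tauto
  · rintro hg p ⟨c, hc, rfl⟩
    have hcl : c ∈ b.toList := (PySem.Set.mem_ofList _ _).mp hc
    simp only [ne_eq]
    rintro ⟨hcnt, hne⟩
    have hcnt' : b.toList.count c = 1 := by exact_mod_cast hcnt
    rcases hg c hcl with h2 | hund
    · omega
    · exact hne hund

theorem A_values (b : String) : happyLadybugs b = "YES" ∨ happyLadybugs b = "NO" := by
  rw [happyLadybugs]
  split_ifs with h1 h2
  · left; rfl
  · right; rfl
  · exact loop_values _ _ _ 0 rfl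

theorem B_values (b : String) : happyLadybugs_alt b = "YES" ∨ happyLadybugs_alt b = "NO" :=
  altLoop_values _

theorem goodL_goodB {l : List Char} (h : GoodL l) : GoodB l := by
  intro c hc
  rcases h c hc with h2 | ⟨hund, _⟩
  · exact Or.inl h2
  · exact Or.inr hund

theorem goodB_not_goodL_D (b : String) (hB : GoodB b.toList) (hL : ¬ GoodL b.toList) :
    D_happyLadybugs b := by
  have hex : ∃ c, c ∈ b.toList ∧ b.toList.count c < 2 ∧
      ¬(c = '_' ∧ ∀ d ∈ b.toList, d ≤ c) := by
    by_contra h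
    apply hL
    intro c hc
    by_cases h2 : 2 ≤ b.toList.count c
    · exact Or.inl h2
    · by_cases h3 : c = '_' ∧ ∀ d ∈ b.toList, d ≤ c
      · exact Or.inr h3
      · exact absurd ⟨c, hc, by omega, h3⟩ h
  rw [D_iff]
  obtain ⟨c, hc, hcnt, hnot⟩ := hex
  have hc' : c = '_' := by
    rcases hB c hc with h2 | h2
    · omega
    · exact h2
  subst hc'
  have hcount1 : b.toList.count '_' = 1 := by
    have h1 : 1 ≤ b.toList.count '_' := List.count_pos_iff.mpr hc
    omega
  refine ⟨hcount1, ?_, ?_⟩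
  · by_contra hno
    refine hnot ⟨rfl, fun d hd => ?_⟩
    by_contra hle
    exact hno ⟨d, hd, not_le.mp hle⟩
  · intro d hd hdne
    rcases hB d hd with h2 | h2
    · exact h2
    · exact absurd h2 hdne

theorem D_goodB_not_goodL (b : String) (hD : D_happyLadybugs b) :
    GoodB b.toList ∧ ¬ GoodL b.toList := by
  obtain ⟨h1, ⟨d, hd, hdc⟩, hall⟩ := (D_iff b).mp hD
  constructor
  · intro c hc
    by_cases hcu : c = '_'
    · exact Or.inr hcu
    · exact Or.inl (hall c hc hcu)
  · intro hg
    have hu : '_' ∈ b.toList := List.count_pos_iff.mp (by omega)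
    rcases hg '_' hu with h2 | ⟨_, hmax⟩
    · omega
    · exact absurd (hmax d hd) (not_le.mpr hdc)

-- ===== VERDICT (by name: the statement is the Claim_ definition above) =====
theorem happyLadybugs_spec : Claim_unchanged_happyLadybugs := by
  intro b _hd
  unfold Spec_happyLadybugs
  intro hnD
  have h : happyLadybugs b = "YES" ↔ happyLadybugs_alt b = "YES" := by
    rw [A_yes_iff, B_yes_iff]
    constructor
    · exact goodL_goodB
    · intro hB
      by_contra hL
      exact hnD (goodB_not_goodL_D b hB hL)
  rcases A_values b with hA | hA <;> rcases B_values b with hB | hB <;> rw [hA, hB]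
  · exact absurd (h.mp hA) (by simp [hB])
  · exact absurd (h.mpr hB) (by simp [hA])

theorem happyLadybugs_changed : Claim_changed_happyLadybugs := by
  unfold Claim_changed_happyLadybugs
  refine ⟨by decide, by decide, ?_, by decide, by decide⟩
  show happyLadybugs pvDiffWitness_happyLadybugs = pvDiffWitnessOut_happyLadybugs.1
  have hs : PySem.List.sorted (String.toList pvDiffWitness_happyLadybugs) (fun x => x) false
      = ['_', 'a', 'a'] := by decide
  rw [happyLadybugs]
  simp only [hs]
  rw [happyLadybugsLoop]
  norm_num [show PySem.List.pyGet? ['_', 'a', 'a'] (((0:Nat):Int)) = some '_' from by decide,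
    show PySem.List.pyGet? ['_', 'a', 'a'] (((0:Nat):Int) + 1) = some 'a' from by decide]
  rw [if_neg (by decide)]
  rfl

theorem happyLadybugs_tight : Claim_exact_happyLadybugs := by
  intro b _hd hD heq
  obtain ⟨hB, hL⟩ := D_goodB_not_goodL b hD
  have hBy : happyLadybugs_alt b = "YES" := (B_yes_iff b).mpr hB
  have hAy : happyLadybugs b ≠ "YES" := fun h => hL ((A_yes_iff b).mp h)
  exact hAy (heq.trans hBy)
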